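-- pv_equiv track=rewrite | github.com/soniafoco/Lab07 | model/model.py | is_valida
-- ===== SOURCE A (Python) =====
-- def is_valida(soluzione, citta):
--     if len(soluzione)>5:
--         for c in citta:
--             if soluzione.count(c) > 6:
--                 return False
--     if len(soluzione) == 1:
--         return True
--     if len(soluzione) == 2:
--         if soluzione[0] != soluzione[1]:
--             return False
--     elif len(soluzione) >= 3:
--         count = 1
--         for i in range(1, len(soluzione)):
--             if soluzione[i] == soluzione[i-1]:
--                 count += 1
--             else:
--                 if count<3:
--                     return False
--                 count = 1
--         return True
--     return True
-- ===== SOURCE B (Python) =====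
-- def is_valida(soluzione, citta):
--     if len(soluzione) > 5:
--         target = set(citta)
--         seen = {}
--         for s in soluzione:
--             seen[s] = seen.get(s, 0) + 1
--             if seen[s] == 7 and s in target:
--                 return False
--     padded = [None, None] + soluzione
--     return all(
--         x == y or (a == x and b == x)
--         for a, b, x, y in zip(padded, padded[1:], soluzione, soluzione[1:])
--     )
-- ===== Notes on version B (the rewrite author's own statement) =====
-- stated objective: alternative
-- what changed: B replaces A's per-city count scan by a single streaming pass over soluzione that returns False the moment any element's running count reaches 7 for a city, and replaces A's running run-length counter by a window check over zipped None-padded shifted copies: every boundary s[i]!=s[i+1] must be preceded by two equal elements (s[i-2]==s[i-1]==s[i]), which subsumes the len 1/2 special cases.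
import Mathlib
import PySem

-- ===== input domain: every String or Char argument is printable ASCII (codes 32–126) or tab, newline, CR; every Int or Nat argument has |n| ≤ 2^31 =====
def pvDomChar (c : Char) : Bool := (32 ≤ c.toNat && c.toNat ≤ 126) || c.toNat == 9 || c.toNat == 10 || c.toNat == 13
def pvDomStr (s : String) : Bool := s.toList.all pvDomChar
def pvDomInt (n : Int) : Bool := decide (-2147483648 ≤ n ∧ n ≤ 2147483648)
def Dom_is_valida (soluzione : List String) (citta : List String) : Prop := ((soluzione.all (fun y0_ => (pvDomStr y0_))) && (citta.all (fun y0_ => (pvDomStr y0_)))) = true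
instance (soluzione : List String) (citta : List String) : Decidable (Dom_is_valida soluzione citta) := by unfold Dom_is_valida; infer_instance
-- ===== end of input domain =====

-- B streams the frequency guard with an early exit on the 7th occurrence of a city and
-- checks run boundaries through a window over zipped None-padded shifted copies instead of
-- A's per-city count scan plus running run-length counter (objective: alternative).

-- ===== PORT A =====
-- A's inner counter loop over indices 1..len-1, carried as recursion on the tail with prev element and count
def isvA_loop : List String → String → Nat → Bool
  | [], _, _ => true
  | x :: rest, prev, count =>
      if x == prev then isvA_loop rest x (count + 1)
      else if count < 3 then false else isvA_loop rest x 1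

def is_valida (soluzione : List String) (citta : List String) : Bool :=
  -- "if len(soluzione)>5: for c in citta: if soluzione.count(c) > 6: return False"
  if soluzione.length > 5 && citta.any (fun c => PySem.List.count soluzione c > 6) then
    false
  else if soluzione.length == 1 then true
  else if soluzione.length == 2 then
    (match soluzione with
     | a :: b :: _ => a == b   -- "if soluzione[0] != soluzione[1]: return False" else fall through to True
     | _ => true)
  else if soluzione.length ≥ 3 then
    (match soluzione with
     | h :: t => isvA_loop t h 1
     | [] => true)
  else true

-- ===== PORT B =====
-- "for s in soluzione: seen[s] = seen.get(s, 0) + 1; if seen[s] == 7 and s in target: return False"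
-- (returns true iff the loop returned False)
def isvB_guard (target : PySem.Set String) : PySem.Dict String Int → List String → Bool
  | _, [] => false
  | seen, s :: rest =>
      let c := seen.getD s 0 + 1
      if c == 7 && PySem.Set.contains target s then true
      else isvB_guard target (seen.insert s c) rest

def is_valida_alt (soluzione : List String) (citta : List String) : Bool :=
  if soluzione.length > 5 &&
      isvB_guard (PySem.Set.ofList citta) PySem.Dict.empty soluzione then
    false
  else
    -- padded = [None, None] + soluzione; all(x == y or (a == x and b == x) for a,b,x,y in zip(padded, padded[1:], soluzione, soluzione[1:]))
    let padded : List (Option String) := [none, none] ++ soluzione.map some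
    let quads := List.zip padded (List.zip (padded.drop 1) (List.zip soluzione (soluzione.drop 1)))
    quads.all (fun q => (q.2.2.1 == q.2.2.2) || (q.1 == some q.2.2.1 && q.2.1 == some q.2.2.1))

-- ===== PRECONDITION & SPEC =====
def Spec_is_valida (soluzione : List String) (citta : List String) (out : Bool) : Prop := out = is_valida_alt soluzione citta
instance (soluzione : List String) (citta : List String) (out : Bool) : Decidable (Spec_is_valida soluzione citta out) := by unfold Spec_is_valida; infer_instance

-- ===== CLAIM (what is proved, stated in full; the proofs are below) =====
def Claim_equal_is_valida : Prop := ∀ (soluzione : List String) (citta : List String), Dom_is_valida soluzione citta → Spec_is_valida soluzione citta (is_valida soluzione citta)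

-- ===== LEMMAS AND PROOFS =====

-- recursive form of B's window-all over the zipped padded shifts: pads a = s[i-2], b = s[i-1]
def pvW : Option String → Option String → List String → Bool
  | _, _, [] => true
  | _, _, [_] => true
  | a, b, x :: y :: rest => ((x == y) || (a == some x && b == some x)) && pvW b (some x) (y :: rest)

theorem pvZip_eq_pvW (s : List String) (a b : Option String) :
    (List.zip (a :: b :: s.map some)
        (List.zip ((b :: s.map some))
          (List.zip s (s.drop 1)))).all
      (fun q => (q.2.2.1 == q.2.2.2) || (q.1 == some q.2.2.1 && q.2.1 == some q.2.2.1))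
      = pvW a b s := by
  induction s generalizing a b with
  | nil => rfl
  | cons x s' ih =>
      cases s' with
      | nil => rfl
      | cons y rest =>
          have ih' := ih b (some x)
          simp only [List.map_cons, List.drop_succ_cons, List.drop_zero, List.zip_cons_cons,
            List.all_cons, pvW] at ih' ⊢
          rw [ih']

-- A's counter loop equals the window check, under the window/count invariant
theorem pvLoop_eq_pvW (t : List String) (prev : String) (count : Nat) (a b : Option String)
    (h1 : count = 1 → b ≠ some prev)
    (h2 : count = 2 → b = some prev ∧ a ≠ some prev)
    (h3 : 3 ≤ count → a = some prev ∧ b = some prev)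
    (hc : 1 ≤ count) :
    isvA_loop t prev count = pvW a b (prev :: t) := by
  induction t generalizing prev count a b with
  | nil => simp [isvA_loop, pvW]
  | cons y t' ih =>
      simp only [isvA_loop, pvW]
      by_cases hxy : y = prev
      · subst hxy
        have : (y == y) = true := by simp
        rw [if_pos (by simp)]
        rw [ih y (count + 1) b (some y)
          (by intro h; omega)
          (by intro h; refine ⟨rfl, ?_⟩; have := h1 (by omega); simpa using this)
          (by intro h
              refine ⟨?_, rfl⟩
              rcases Nat.lt_or_ge count 3 with hlt | hge
              · have : count = 2 := by omega
                exact (h2 this).1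
              · exact (h3 hge).2)
          (by omega)]
        simp
      · rw [if_neg (by simpa using hxy)]
        have hfac : ((prev == y) : Bool) = false := by
          simp only [beq_eq_false_iff_ne, ne_eq]
          intro h; exact hxy h.symm
        by_cases hcnt : count < 3
        · rw [if_pos hcnt]
          have : (a == some prev && b == some prev) = false := by
            rcases Nat.lt_or_ge count 2 with h | h
            · have := h1 (by omega)
              simp [this]
            · have := (h2 (by omega)).2
              simp [this]
          simp [hfac, this]
        · rw [if_neg hcnt]
          have h3' := h3 (by omega)
          rw [ih y 1 b (some prev)
            (by intro _; simp only [ne_eq, Option.some.injEq]; intro h; exact hxy h.symm)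
            (by intro h; omega)
            (by intro h; omega)
            (by omega)]
          simp [hfac, h3'.1, h3'.2]

-- B's streaming guard equals A's per-city count test, via the prefix-count invariant
theorem pvGuard_eq (citta : List String) (rest : List String)
    (seen : PySem.Dict String Int) (pre : List String)
    (hseen : ∀ s, seen.getD s 0 = (pre.count s : Int))
    (hbound : ∀ c ∈ citta, pre.count c ≤ 6) :
    isvB_guard (PySem.Set.ofList citta) seen rest
      = citta.any (fun c => PySem.List.count (pre ++ rest) c > 6) := by
  induction rest generalizing seen pre with
  | nil =>
      simp only [isvB_guard, List.append_nil]
      symm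
      simp only [List.any_eq_false]
      intro c hc
      have := hbound c hc
      simp [PySem.List.count_eq]
      omega
  | cons s rest ih =>
      simp only [isvB_guard]
      by_cases htrig : (seen.getD s 0 + 1 == (7 : Int)) = true ∧ PySem.Set.contains (PySem.Set.ofList citta) s = true
      · have hs : s ∈ citta := by
          have h2 := htrig.2
          rw [PySem.Set.contains_iff] at h2
          exact (PySem.Set.mem_ofList citta s).1 h2
        rw [if_pos (by simp [htrig.1, hs])]
        have h7 : (pre.count s : Int) = 6 := by
          have := htrig.1
          rw [hseen s] at this
          simp at this
          omega
        symm
        rw [List.any_eq_true]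
        refine ⟨s, hs, ?_⟩
        have : (pre ++ s :: rest).count s = pre.count s + 1 + rest.count s := by
          simp [List.count_append]; omega
        simp [PySem.List.count_eq, this]
        omega
      · rw [if_neg (by intro h; exact htrig (by simpa using h))]
        have heq : (pre ++ s :: rest) = (pre ++ [s]) ++ rest := by simp
        rw [heq]
        apply ih
        · intro t
          rw [PySem.Dict.getD_insert]
          by_cases hts : t = s
          · subst hts
            rw [if_pos rfl, hseen t]
            simp [List.count_append]
          · rw [if_neg hts, hseen t]
            have hst : ¬ s = t := fun h => hts h.symm
            simp [List.count_append, hst]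
        · intro c hc
          by_cases hcs : c = s
          · subst hcs
            have hmem : PySem.Set.contains (PySem.Set.ofList citta) c = true := by
              rw [PySem.Set.contains_iff]
              exact (PySem.Set.mem_ofList citta c).2 hc
            have hne7 : ¬ (seen.getD c 0 + 1 == (7 : Int)) = true := by
              intro h; exact htrig ⟨h, hmem⟩
            rw [hseen c] at hne7
            have h7 : (pre.count c : Int) + 1 ≠ 7 := by simpa using hne7
            have hb := hbound c hc
            have hcc : (pre ++ [c]).count c = pre.count c + 1 := by
              simp [List.count_append]
            omega
          · have hcc : (pre ++ [s]).count c = pre.count c := by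
              have hsc : ¬ s = c := fun h => hcs h.symm
              simp [List.count_append, hsc]
            rw [hcc]
            exact hbound c hc

-- A's post-guard length cases all equal the window check from the empty pads
theorem pvA_cases_eq_pvW (s : List String) :
    (if s.length == 1 then true
     else if s.length == 2 then
       (match s with
        | a :: b :: _ => a == b
        | _ => true)
     else if s.length ≥ 3 then
       (match s with
        | h :: t => isvA_loop t h 1
        | [] => true)
     else true) = pvW none none s := by
  match s with
  | [] => rfl
  | [a] => rfl
  | [a, b] =>
      simp only [pvW]
      by_cases hab : a = b
      · simp [hab]
      · simp [Ne.symm]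
  | a :: b :: c :: t =>
      have hlen : (a :: b :: c :: t).length ≥ 3 := by simp
      rw [if_neg (by simp), if_neg (by simp), if_pos hlen]
      exact pvLoop_eq_pvW (b :: c :: t) a 1 none none
        (by intro _; simp) (by omega) (by omega) (by omega)

-- ===== VERDICT (by name: the statement is the Claim_ definition above) =====
theorem is_valida_spec : Claim_equal_is_valida := by
  intro s citta _
  unfold Spec_is_valida is_valida is_valida_alt
  have hguard : isvB_guard (PySem.Set.ofList citta) PySem.Dict.empty s
      = citta.any (fun c => PySem.List.count s c > 6) := by
    have := pvGuard_eq citta s PySem.Dict.empty []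
      (by intro t; simp [PySem.Dict.getD_empty]) (by intro c _; simp)
    simpa using this
  rw [hguard]
  by_cases hbad : (decide (s.length > 5) && citta.any (fun c => decide (PySem.List.count s c > 6))) = true
  · rw [if_pos hbad, if_pos hbad]
  · rw [if_neg hbad, if_neg hbad]
    have hzip := pvZip_eq_pvW s none none
    simp only [List.cons_append, List.nil_append, List.drop_succ_cons, List.drop_zero] at hzip ⊢
    rw [hzip]
    exact pvA_cases_eq_pvW s
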